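-- pv_equiv track=rewrite | github.com/joaovitortor/Hashing-Extensivel | TAD.py | gerar_endereco
-- ===== SOURCE A (Python) =====
-- def gerar_endereco(chave: int, profundidade: int) -> int:
--     '''
--     Retorna uma sequência de bits extraído de uma chave (valor hash) para formar um endereço
--     que possui comprimento definido pela profundidade.
--     '''
--     val_ret = 0
--     mascara = 1
--
--     val_hash = chave
--     for _ in range(1, profundidade):
--         val_ret = val_ret << 1
--         bit_baixa_ordem = val_hash & mascara
--         val_ret = val_ret | bit_baixa_ordem
--         val_hash = val_hash >> 1
--     return val_ret
-- ===== SOURCE B (Python) =====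
-- def gerar_endereco(chave: int, profundidade: int) -> int:
--     n = profundidade - 1
--     if n <= 0:
--         return 0
--     low = chave & ((1 << n) - 1)
--     s = format(low, '0{}b'.format(n))
--     return int(s[::-1], 2)
-- ===== Notes on version B (the rewrite author's own statement) =====
-- stated objective: alternative
-- what changed: Replaces A's shift-accumulator bit loop with a string-representation pipeline: mask the low profundidade-1 bits, format them as a fixed-width binary string, reverse the string with a slice, and parse it back with int(s, 2).
import Mathlib
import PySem

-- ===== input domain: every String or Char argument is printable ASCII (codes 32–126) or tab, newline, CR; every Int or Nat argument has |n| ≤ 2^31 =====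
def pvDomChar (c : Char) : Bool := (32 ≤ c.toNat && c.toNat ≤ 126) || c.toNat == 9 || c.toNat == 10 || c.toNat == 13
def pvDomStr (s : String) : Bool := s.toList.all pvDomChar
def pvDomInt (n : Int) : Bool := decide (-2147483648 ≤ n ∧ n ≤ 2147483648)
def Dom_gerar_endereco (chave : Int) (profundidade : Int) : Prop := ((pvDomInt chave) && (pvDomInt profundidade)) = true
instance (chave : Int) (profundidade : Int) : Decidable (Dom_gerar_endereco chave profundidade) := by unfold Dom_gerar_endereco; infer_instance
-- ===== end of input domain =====

-- B replaces A's shift-accumulator bit loop by masking the low bits, formatting them as a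
-- fixed-width binary string, reversing that string and parsing it back (objective: alternative).

-- ===== PORT A =====
def gerar_endereco (chave : Int) (profundidade : Int) : Int :=
  ((PySem.List.pyRange 1 profundidade 1).foldl
    (fun (st : Int × Int) (_ : Int) =>
      let val_ret := st.1 <<< (1 : Nat)
      let bit_baixa_ordem := PySem.Int.band st.2 1
      let val_ret := PySem.Int.bor val_ret bit_baixa_ordem
      (val_ret, st.2 >>> (1 : Nat)))
    (0, chave)).1

-- ===== PORT B =====
-- hand port of format(v, '0{m}b') for 0 ≤ v < 2^m: exactly m binary digits, MSB first,
-- zero-padded on the left (exact on that domain, the only one Source B reaches)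
def pvFmtBin : Nat → Nat → List Char
  | 0, _ => []
  | m + 1, v => pvFmtBin m (v / 2) ++ [if v % 2 = 1 then '1' else '0']

-- hand port of int(s, 2) for strings of '0'/'1' digits (exact on that domain)
def pvParseBin (s : List Char) : Nat :=
  s.foldl (fun a c => 2 * a + (if c = '1' then 1 else 0)) 0

def gerar_endereco_alt (chave : Int) (profundidade : Int) : Int :=
  let n := profundidade - 1
  if n ≤ 0 then 0
  else
    let low := PySem.Int.band chave (((1 : Int) <<< n.toNat) - 1)
    let s := pvFmtBin n.toNat low.toNat
    (pvParseBin s.reverse : Int)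

-- ===== PRECONDITION & SPEC =====
def Spec_gerar_endereco (chave : Int) (profundidade : Int) (out : Int) : Prop := out = gerar_endereco_alt chave profundidade
instance (chave : Int) (profundidade : Int) (out : Int) : Decidable (Spec_gerar_endereco chave profundidade out) := by unfold Spec_gerar_endereco; infer_instance

-- ===== CLAIM (what is proved, stated in full; the proofs are below) =====
def Claim_equal_gerar_endereco : Prop := ∀ (chave : Int) (profundidade : Int), Dom_gerar_endereco chave profundidade → Spec_gerar_endereco chave profundidade (gerar_endereco chave profundidade)

-- ===== LEMMAS AND PROOFS =====

-- A's loop body, as a step function on the (val_ret, val_hash) state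
def pvStep (st : Int × Int) : Int × Int :=
  (PySem.Int.bor (st.1 <<< (1 : Nat)) (PySem.Int.band st.2 1), st.2 >>> (1 : Nat))

-- the reversal of the low k bits of c (Horner recurrence, = A's loop value)
def pvS : Nat → Int → Int
  | 0, _ => 0
  | k + 1, c => 2 * pvS k c + PySem.Int.band (c >>> k) 1

theorem pv_band_one_cases (h : Int) : PySem.Int.band h 1 = 0 ∨ PySem.Int.band h 1 = 1 := by
  rw [PySem.Int.band_one]; exact PySem.Int.mod_two_eq h

theorem pvS_nonneg (k : Nat) (c : Int) : 0 ≤ pvS k c := by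
  induction k with
  | zero => simp [pvS]
  | succ k ih =>
    rcases pv_band_one_cases (c >>> k) with hb | hb <;> simp [pvS, hb] <;> omega

theorem pv_nat_two_mul_lor_one (a : Nat) : 2 * a ||| 1 = 2 * a + 1 := by
  apply Nat.eq_of_testBit_eq
  intro i
  cases i with
  | zero => simp [Nat.testBit_zero]
  | succ j =>
    rw [Nat.testBit_lor]
    have h1 : 2 * a / 2 = a := by omega
    have h2 : (2 * a + 1) / 2 = a := by omega
    simp [Nat.testBit_add_one, h1, h2]

theorem pv_or_add (r b : Int) (hr : 0 ≤ r) (hb : b = 0 ∨ b = 1) :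
    PySem.Int.bor (r <<< (1 : Nat)) b = 2 * r + b := by
  have hs : r <<< (1 : Nat) = 2 * r := by rw [Int.shiftLeft_eq]; ring
  rcases hb with hb | hb
  · simp [hb, hs]
  · subst hb
    rw [hs]
    have h2r : (2 : Int) * r = ((2 * r.toNat : Nat) : Int) := by omega
    rw [h2r]
    have h1 : (1 : Int) = ((1 : Nat) : Int) := rfl
    rw [h1, PySem.Int.bor_natCast, pv_nat_two_mul_lor_one]
    push_cast
    ring

theorem pv_shiftRight_shiftRight (c : Int) (k : Nat) : (c >>> k) >>> (1 : Nat) = c >>> (k + 1) := by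
  rw [Int.shiftRight_eq_div_pow, Int.shiftRight_eq_div_pow, Int.shiftRight_eq_div_pow]
  push_cast
  rw [Int.ediv_ediv_of_nonneg (by positivity : (0:Int) ≤ 2 ^ k)]
  norm_num [pow_succ]

theorem pv_iterate (k : Nat) (c : Int) : pvStep^[k] (0, c) = (pvS k c, c >>> k) := by
  induction k with
  | zero => simp [pvS]
  | succ k ih =>
    rw [Function.iterate_succ_apply', ih]
    unfold pvStep
    dsimp only
    rw [pv_or_add _ _ (pvS_nonneg k c) (pv_band_one_cases _), pv_shiftRight_shiftRight]
    rfl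

theorem pv_foldl_const (l : List Int) (st : Int × Int) :
    l.foldl (fun s _ => pvStep s) st = pvStep^[l.length] st := by
  induction l generalizing st with
  | nil => rfl
  | cons x xs ih => simp [List.foldl_cons, Function.iterate_succ_apply, ih]

theorem pv_A_eq (chave profundidade : Int) :
    gerar_endereco chave profundidade = pvS (profundidade - 1).toNat chave := by
  unfold gerar_endereco
  have hlen : (PySem.List.pyRange 1 profundidade 1).length = (profundidade - 1).toNat := by
    simp [pysem]
  have hbody : ((PySem.List.pyRange 1 profundidade 1).foldl
      (fun (st : Int × Int) (_ : Int) =>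
        let val_ret := st.1 <<< (1 : Nat)
        let bit_baixa_ordem := PySem.Int.band st.2 1
        let val_ret := PySem.Int.bor val_ret bit_baixa_ordem
        (val_ret, st.2 >>> (1 : Nat)))
      (0, chave)) = (PySem.List.pyRange 1 profundidade 1).foldl (fun s _ => pvStep s) (0, chave) := rfl
  rw [hbody, pv_foldl_const, hlen, pv_iterate]

-- bit j of c, as an Int: band (c >>> j) 1 = (c / 2^j) % 2
theorem pv_bit_eq (c : Int) (j : Nat) : PySem.Int.band (c >>> j) 1 = (c / 2 ^ j) % 2 := by
  rw [PySem.Int.band_one, PySem.Int.mod_eq_emod_of_pos (by omega), Int.shiftRight_eq_div_pow]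
  push_cast
  rfl

-- pvS as a positional sum
theorem pvS_sum (m : Nat) (c : Int) :
    pvS m c = ∑ j ∈ Finset.range m, (c / 2 ^ j) % 2 * 2 ^ (m - 1 - j) := by
  induction m with
  | zero => simp [pvS]
  | succ m ih =>
    rw [Finset.sum_range_succ]
    have hlast : (c / 2 ^ m) % 2 * 2 ^ (m + 1 - 1 - m) = (c / 2 ^ m) % 2 := by
      simp
    rw [hlast]
    have hshift : ∑ j ∈ Finset.range m, (c / 2 ^ j) % 2 * 2 ^ (m + 1 - 1 - j)
        = 2 * ∑ j ∈ Finset.range m, (c / 2 ^ j) % 2 * 2 ^ (m - 1 - j) := by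
      rw [Finset.mul_sum]
      apply Finset.sum_congr rfl
      intro j hj
      have hjm : j < m := Finset.mem_range.mp hj
      have he : m + 1 - 1 - j = (m - 1 - j) + 1 := by omega
      rw [he, pow_succ]
      ring
    rw [hshift]
    simp [pvS, pv_bit_eq, ih]

-- masking with 2^m - 1 is taking the low m bits (two's complement, any sign)
theorem pv_band_mask (a : Int) (m : Nat) :
    PySem.Int.band a (((1 : Int) <<< m) - 1) = a % (2 ^ m : Int) := by
  have hpow : ((2 : Int) ^ m) = ((2 ^ m : Nat) : Int) := by push_cast; rfl
  have h1n : (1 : Nat) ≤ 2 ^ m := Nat.one_le_two_pow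
  have hmask : ((1 : Int) <<< m) - 1 = ((2 ^ m - 1 : Nat) : Int) := by
    rw [Int.shiftLeft_eq]; push_cast [h1n]; ring
  rcases le_or_gt 0 a with ha | ha
  · rw [hmask]
    have h2 : a = ((a.toNat : Nat) : Int) := by omega
    rw [h2, PySem.Int.band_natCast, Nat.and_two_pow_sub_one_eq_mod]
    push_cast
    rfl
  · -- negative a: second branch of band
    unfold PySem.Int.band
    have hb : (0 : Int) ≤ ((1 : Int) <<< m) - 1 := by rw [Int.shiftLeft_eq]; nlinarith [hpow, h1n]
    rw [if_neg (by omega), if_pos hb]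
    have hbt : (((1 : Int) <<< m) - 1).toNat = 2 ^ m - 1 := by
      rw [Int.shiftLeft_eq]; omega
    rw [hbt, Nat.and_comm, Nat.and_two_pow_sub_one_eq_mod]
    -- a = -(k+1) with k = (-a-1).toNat
    set k : Nat := (-a - 1).toNat with hk
    have hkm : ((k : Int)) % 2 ^ m = ((k % 2 ^ m : Nat) : Int) := by push_cast; rfl
    have hr_lt : (k % 2 ^ m : Nat) < 2 ^ m := Nat.mod_lt _ (by positivity)
    have hmod : a % (2 ^ m : Int) = 2 ^ m - 1 - ((k % 2 ^ m : Nat) : Int) := by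
      have hdiv := Int.mul_ediv_add_emod (k : Int) (2 ^ m)
      rw [hkm] at hdiv
      have hak : ((k : Int)) = -a - 1 := by omega
      have hdecomp : a = (2 ^ m - 1 - ((k % 2 ^ m : Nat) : Int)) + 2 ^ m * (-(((k : Int) / 2 ^ m) + 1)) := by
        have hexp : (2 : Int) ^ m * (-(((k : Int) / 2 ^ m) + 1)) = -(2 ^ m * ((k : Int) / 2 ^ m)) - 2 ^ m := by
          ring
        linarith [hdiv, hexp, hak]
      rw [hdecomp, Int.add_mul_emod_self_left]
      apply Int.emod_eq_of_lt <;> push_cast <;> omega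
    rw [hmod]
    push_cast
    omega

-- low m bits agree: for j < m, bit j of (a % 2^m) = bit j of a
theorem pv_low_bit (a : Int) (m j : Nat) (hj : j < m) :
    ((a % (2 ^ m : Int)) / 2 ^ j) % 2 = (a / 2 ^ j) % 2 := by
  have hq := Int.mul_ediv_add_emod a (2 ^ m : Int)
  have hpow : (2 : Int) ^ (m - j) * 2 ^ j = 2 ^ m := by
    rw [← pow_add]; congr 1; omega
  have hsplit : a = a % (2 ^ m : Int) + (a / (2 ^ m : Int)) * 2 ^ (m - j) * 2 ^ j := by
    rw [mul_assoc, hpow]; linarith [hq]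
  have hdiv : a / 2 ^ j = a % (2 ^ m : Int) / 2 ^ j + (a / (2 ^ m : Int)) * 2 ^ (m - j) := by
    conv_lhs => rw [hsplit]
    rw [Int.add_mul_ediv_right _ _ (pow_ne_zero j two_ne_zero)]
  have htwo : (a / (2 ^ m : Int)) * 2 ^ (m - j) = (a / (2 ^ m : Int) * 2 ^ (m - j - 1)) * 2 := by
    have hp : (2 : Int) ^ (m - j) = 2 ^ (m - j - 1) * 2 := by
      rw [← pow_succ]; congr 1; omega
    rw [hp]; ring
  rw [hdiv, htwo]
  omega

theorem pvFmtBin_length (m v : Nat) : (pvFmtBin m v).length = m := by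
  induction m generalizing v with
  | zero => rfl
  | succ m ih => simp [pvFmtBin, ih]

theorem pvParse_init (l : List Char) (a : Nat) :
    l.foldl (fun a c => 2 * a + (if c = '1' then 1 else 0)) a
      = a * 2 ^ l.length + l.foldl (fun a c => 2 * a + (if c = '1' then 1 else 0)) 0 := by
  induction l generalizing a with
  | nil => simp
  | cons c l ih =>
    simp only [List.foldl_cons, List.length_cons]
    rw [ih (2 * a + _), ih (2 * 0 + _)]
    ring

-- parsing the reversed fixed-width binary string yields the positional (reversed) sum
theorem pvParse_fmt (m v : Nat) :
    pvParseBin (pvFmtBin m v).reverse = ∑ j ∈ Finset.range m, v / 2 ^ j % 2 * 2 ^ (m - 1 - j) := by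
  induction m generalizing v with
  | zero => simp [pvFmtBin, pvParseBin]
  | succ m ih =>
    rw [Finset.sum_range_succ']
    simp only [pvFmtBin, List.reverse_append, List.reverse_singleton, List.singleton_append]
    unfold pvParseBin
    rw [List.foldl_cons, pvParse_init, List.length_reverse, pvFmtBin_length]
    have hbit : (2 * 0 + if (if v % 2 = 1 then '1' else '0') = '1' then 1 else 0) = v % 2 := by
      rcases Nat.mod_two_eq_zero_or_one v with h | h <;> simp [h]
    rw [hbit]
    have hrest : ∑ j ∈ Finset.range m, v / 2 ^ (j + 1) % 2 * 2 ^ (m + 1 - 1 - (j + 1))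
        = ∑ j ∈ Finset.range m, (v / 2) / 2 ^ j % 2 * 2 ^ (m - 1 - j) := by
      apply Finset.sum_congr rfl
      intro j hj
      have hjm : j < m := Finset.mem_range.mp hj
      have hd : v / 2 ^ (j + 1) = (v / 2) / 2 ^ j := by
        rw [pow_succ']
        rw [Nat.div_div_eq_div_mul]
      have he : m + 1 - 1 - (j + 1) = m - 1 - j := by omega
      rw [hd, he]
    rw [hrest, ← ih (v / 2)]
    have hs : v / 2 ^ 0 % 2 * 2 ^ (m + 1 - 1 - 0) = v % 2 * 2 ^ m := by simp
    rw [hs]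
    unfold pvParseBin
    ring

theorem pv_B_eq (c p : Int) :
    gerar_endereco_alt c p = pvS (p - 1).toNat c := by
  unfold gerar_endereco_alt
  dsimp only
  by_cases hn : p - 1 ≤ 0
  · have h0 : (p - 1).toNat = 0 := by omega
    rw [if_pos hn, h0]
    rfl
  · rw [if_neg hn]
    set m : Nat := (p - 1).toNat with hm
    set low : Int := PySem.Int.band c (((1 : Int) <<< m) - 1) with hlow
    have hlowmod : low = c % (2 ^ m : Int) := pv_band_mask c m
    have hlow0 : 0 ≤ low := by
      rw [hlowmod]; exact Int.emod_nonneg _ (by positivity)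
    have hcast : ((low.toNat : Nat) : Int) = low := Int.toNat_of_nonneg hlow0
    rw [pvS_sum, pvParse_fmt]
    push_cast
    apply Finset.sum_congr rfl
    intro j hj
    have hjm : j < m := Finset.mem_range.mp hj
    have h1 : ((low.toNat / 2 ^ j % 2 : Nat) : Int) = (low / 2 ^ j) % 2 := by
      rw [← hcast]
      push_cast
      rfl
    have hbit : ((low.toNat / 2 ^ j % 2 : Nat) : Int) = (c / 2 ^ j) % 2 := by
      rw [h1, hlowmod, pv_low_bit c m j hjm]
    push_cast at hbit
    rw [hbit]

-- ===== VERDICT (by name: the statement is the Claim_ definition above) =====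
theorem gerar_endereco_spec : Claim_equal_gerar_endereco := by
  intro chave profundidade _
  unfold Spec_gerar_endereco
  rw [pv_A_eq, pv_B_eq]
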